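-- pv_equiv track=rewrite | github.com/ABCIKA/HUST-CSE-Networkforensics | getAnswers.py | generate_combinations
-- ===== SOURCE A (Python) =====
-- def generate_combinations(options, current_combination=[], index=0):
--     if index == len(options):
--         if len(current_combination) > 1:  # 只保存包含至少两个选项的组合
--             return [",".join(current_combination)]
--         else:
--             return []
--
--     combinations = []
--     combinations.extend(generate_combinations(options, current_combination + [options[index]], index + 1))
--     combinations.extend(generate_combinations(options, current_combination, index + 1))
--     return combinations
-- ===== SOURCE B (Python) =====
-- def generate_combinations(options, current_combination=[], index=0):
--     m = len(options) - index
--     result = []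
--     for mask in range(2 ** m - 1, -1, -1):
--         combo = current_combination + [options[index + j]
--                                        for j in range(m) if (mask >> (m - 1 - j)) & 1]
--         if len(combo) > 1:
--             result.append(",".join(combo))
--     return result
-- ===== Notes on version B (the rewrite author's own statement) =====
-- stated objective: alternative
-- what changed: Replaces A's include/exclude tree recursion with a single iterative loop over a descending bitmask range that materialises each subset directly (MSB = options[index]), preserving A's exact output order.
import Mathlib
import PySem

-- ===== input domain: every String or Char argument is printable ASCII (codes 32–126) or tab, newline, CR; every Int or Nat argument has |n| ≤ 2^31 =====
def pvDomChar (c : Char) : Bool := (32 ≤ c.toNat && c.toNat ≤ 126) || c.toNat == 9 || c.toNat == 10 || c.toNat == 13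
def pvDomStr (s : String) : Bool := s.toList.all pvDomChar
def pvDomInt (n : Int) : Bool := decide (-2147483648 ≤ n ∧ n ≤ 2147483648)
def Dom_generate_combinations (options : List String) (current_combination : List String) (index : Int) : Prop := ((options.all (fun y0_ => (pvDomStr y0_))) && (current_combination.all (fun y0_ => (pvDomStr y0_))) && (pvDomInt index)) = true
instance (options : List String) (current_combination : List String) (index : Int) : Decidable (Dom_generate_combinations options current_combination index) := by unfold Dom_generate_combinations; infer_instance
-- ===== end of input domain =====

-- B replaces A's include/exclude tree recursion by one descending-bitmask loop emitting the same
-- comma-joined subsets in the same order (alternative decomposition, same exponential cost).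

-- ===== PORT A =====
-- fuel = (len(options) - index).toNat + 1 bounds the recursion depth; it is exact wherever the
-- Python returns (index ≤ len); on fuel exhaustion or pyGet? = none Python raises (outside Pre_).
def generate_combinations_rec (options : List String) : Nat → List String → Int → List String
  | 0, _, _ => []
  | fuel+1, current_combination, index =>
    if index = (options.length : Int) then
      if 1 < current_combination.length then [PySem.Str.join "," current_combination] else []
    else
      match PySem.List.pyGet? options index with
      | none => []   -- Python: IndexError (excluded by Pre_)
      | some x =>
        generate_combinations_rec options fuel (current_combination ++ [x]) (index + 1)
          ++ generate_combinations_rec options fuel current_combination (index + 1)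

def generate_combinations (options : List String) (current_combination : List String) (index : Int) : List String :=
  generate_combinations_rec options (((options.length : Int) - index).toNat + 1) current_combination index

-- ===== PORT B =====
-- `mask >> s` on a nonnegative mask is floor division by 2^s and `& 1` is mod 2: exact here since
-- every mask of range(2**m - 1, -1, -1) is ≥ 0.  Inside Pre_ every pyGet? is `some`, as in Python.
def generate_combinations_alt (options : List String) (current_combination : List String) (index : Int) : List String :=
  let m : Int := (options.length : Int) - index
  (PySem.List.pyRange (2 ^ m.toNat - 1) (-1) (-1)).foldl
    (fun result mask =>
      let combo := current_combination ++
        (PySem.List.pyRange 0 m 1).filterMap (fun j =>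
          if PySem.Int.mod (PySem.Int.floordiv mask (2 ^ (m - 1 - j).toNat)) 2 = 1 then
            PySem.List.pyGet? options (index + j)
          else none)
      if 1 < combo.length then result ++ [PySem.Str.join "," combo] else result)
    []

-- ===== PRECONDITION & SPEC =====
-- Pre_ admits exactly the inputs on which the Python A returns: for index > len(options) the
-- recursion walks past the end and options[index] raises IndexError; for index < -len(options) the
-- very first options[index] raises IndexError.  Negative indices in [-len, -1] are INSIDE Pre_.
def Pre_generate_combinations (options : List String) (current_combination : List String) (index : Int) : Prop :=
  -(options.length : Int) ≤ index ∧ index ≤ (options.length : Int)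
instance (options : List String) (current_combination : List String) (index : Int) : Decidable (Pre_generate_combinations options current_combination index) := by unfold Pre_generate_combinations; infer_instance

def pvWitness_generate_combinations : List String × List String × Int := (["a", "b", "c"], [], 0)

def Spec_generate_combinations (options : List String) (current_combination : List String) (index : Int) (out : List String) : Prop := out = generate_combinations_alt options current_combination index
instance (options : List String) (current_combination : List String) (index : Int) (out : List String) : Decidable (Spec_generate_combinations options current_combination index out) := by unfold Spec_generate_combinations; infer_instance

-- ===== CLAIM (what is proved, stated in full; the proofs are below) =====
def Claim_equal_generate_combinations : Prop := ∀ (options : List String) (current_combination : List String) (index : Int), Dom_generate_combinations options current_combination index → Pre_generate_combinations options current_combination index → Spec_generate_combinations options current_combination index (generate_combinations options current_combination index)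

-- ===== LEMMAS AND PROOFS =====

-- Shared reference recursion: the include/exclude subset tree with explicit remaining depth m.
def ecomb (options : List String) : Nat → List String → Int → List String
  | 0, cur, _ => if 1 < cur.length then [PySem.Str.join "," cur] else []
  | m+1, cur, i =>
      ecomb options m (cur ++ [(PySem.List.pyGet? options i).getD ""]) (i + 1)
        ++ ecomb options m cur (i + 1)

-- the elements a mask selects from options[index:index+mI]
def selB (options : List String) (index : Int) (mI : Int) (mask : Int) : List String :=
  (PySem.List.pyRange 0 mI 1).filterMap (fun j =>
    if PySem.Int.mod (PySem.Int.floordiv mask (2 ^ (mI - 1 - j).toNat)) 2 = 1 then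
      PySem.List.pyGet? options (index + j)
    else none)

-- the masks 2^m - 1, …, 1, 0 in descending order
def masksI (m : Nat) : List Int := (List.range (2^m)).map (fun k : Nat => (2:Int)^m - 1 - (k : Int))

-- B's loop body, with the mask list abstracted over the remaining depth m
def gcomb (options : List String) (index : Int) (m : Nat) (cur : List String) : List String :=
  (masksI m).flatMap (fun mask =>
    let combo := cur ++ selB options index (m : Int) mask
    if 1 < combo.length then [PySem.Str.join "," combo] else [])

theorem genA_eq_ecomb (options : List String) (m : Nat) (cur : List String) (index : Int)
    (hlo : -(options.length : Int) ≤ index) (hm : index + m = (options.length : Int)) :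
    generate_combinations_rec options (m + 1) cur index = ecomb options m cur index := by
  induction m generalizing cur index with
  | zero =>
    have h : index = (options.length : Int) := by omega
    simp [generate_combinations_rec, ecomb, h]
  | succ m ih =>
    have hne : ¬ index = (options.length : Int) := by omega
    have hx : ∃ x, PySem.List.pyGet? options index = some x := by
      rw [← Option.ne_none_iff_exists', Ne, PySem.List.pyGet?_eq_none_iff]
      simp [PySem.Raise.InRange]; omega
    obtain ⟨x, hx⟩ := hx
    rw [show m + 1 + 1 = (m+1)+1 from rfl, generate_combinations_rec.eq_def]
    simp only [if_neg hne, hx, ecomb, Option.getD_some]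
    rw [ih _ _ (by omega) (by omega), ih _ _ (by omega) (by omega)]

theorem foldl_if_append {α β : Type} (l : List α) (p : α → Prop) [DecidablePred p] (f : α → β)
    (acc : List β) :
    l.foldl (fun r x => if p x then r ++ [f x] else r) acc
      = acc ++ l.flatMap (fun x => if p x then [f x] else []) := by
  induction l generalizing acc with
  | nil => simp
  | cons a l ih => simp only [List.foldl_cons, List.flatMap_cons, ih]; split_ifs <;> simp

theorem alt_eq_gcomb (options : List String) (cur : List String) (index : Int) (m : Nat)
    (hmn : (options.length : Int) - index = (m : Int)) :
    generate_combinations_alt options cur index = gcomb options index m cur := by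
  unfold generate_combinations_alt gcomb
  rw [hmn]
  simp only [Int.toNat_natCast]
  have hp : ((2:Int) ^ m) = ((2 ^ m : Nat) : Int) := by push_cast; ring
  have h2 : PySem.List.pyRange (2 ^ m - 1) (-1) (-1) = masksI m := by
    rw [PySem.List.pyRange_neg_one]
    have he : ((2:Int) ^ m - 1 - (-1)) = ((2 ^ m : Nat) : Int) := by push_cast; ring
    rw [he, Int.toNat_natCast]
    unfold masksI
    apply List.map_congr_left
    intro k _
    ring
  rw [h2, foldl_if_append (masksI m) _ _ []]
  simp only [List.nil_append]
  rfl

theorem mem_masksI {m : Nat} {mask : Int} (h : mask ∈ masksI m) :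
    0 ≤ mask ∧ mask < 2 ^ m := by
  unfold masksI at h
  simp only [List.mem_map, List.mem_range] at h
  obtain ⟨k, hk, rfl⟩ := h
  have hp : ((2:Int) ^ m) = ((2 ^ m : Nat) : Int) := by push_cast; ring
  omega

theorem selB_zero (options : List String) (index : Int) (mask : Int) :
    selB options index 0 mask = [] := by
  unfold selB
  rw [PySem.List.pyRange_one_eq_nil (by omega)]
  rfl

-- bit arithmetic: the low bits of 2^m + mask agree with those of mask
theorem bit_add_pow {m s : Nat} {mask : Int} (hs : s < m) (h0 : 0 ≤ mask) :
    PySem.Int.mod (PySem.Int.floordiv (2 ^ m + mask) (2 ^ s)) 2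
      = PySem.Int.mod (PySem.Int.floordiv mask (2 ^ s)) 2 := by
  have hp : (0:Int) < 2 ^ s := by positivity
  rw [PySem.Int.floordiv_eq_ediv_of_pos hp, PySem.Int.floordiv_eq_ediv_of_pos hp,
    PySem.Int.mod_eq_emod_of_pos (by omega), PySem.Int.mod_eq_emod_of_pos (by omega)]
  have hexp : 1 + (m - s - 1) + s = m := by omega
  have hdecomp : (2:Int) ^ m + mask = mask + 2 * 2 ^ (m - s - 1) * 2 ^ s := by
    rw [show (2:Int) * 2 ^ (m - s - 1) * 2 ^ s = 2 ^ (1 + (m - s - 1) + s) from by ring, hexp]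
    ring
  rw [hdecomp, Int.add_mul_ediv_right _ _ (by omega), Int.add_mul_emod_self_left]

theorem bit_top {m : Nat} {mask : Int} (h0 : 0 ≤ mask) (hlt : mask < 2 ^ m) :
    PySem.Int.mod (PySem.Int.floordiv (2 ^ m + mask) (2 ^ m)) 2 = 1 := by
  have hp : (0:Int) < 2 ^ m := by positivity
  rw [PySem.Int.floordiv_eq_ediv_of_pos hp, PySem.Int.mod_eq_emod_of_pos (by omega)]
  have h1 : (2:Int) ^ m + mask = mask + 1 * 2 ^ m := by ring
  rw [h1, Int.add_mul_ediv_right _ _ (by omega), Int.ediv_eq_zero_of_lt h0 hlt]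
  rfl

theorem bit_top_low {m : Nat} {mask : Int} (h0 : 0 ≤ mask) (hlt : mask < 2 ^ m) :
    PySem.Int.mod (PySem.Int.floordiv mask (2 ^ m)) 2 = 0 := by
  have hp : (0:Int) < 2 ^ m := by positivity
  rw [PySem.Int.floordiv_eq_ediv_of_pos hp, PySem.Int.mod_eq_emod_of_pos (by omega),
    Int.ediv_eq_zero_of_lt h0 hlt]
  rfl

theorem selB_succ_high (options : List String) (x : String) (index : Int) (m : Nat) (mask : Int)
    (hx : PySem.List.pyGet? options index = some x) (h0 : 0 ≤ mask) (hlt : mask < 2 ^ m) :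
    selB options index ((m : Int) + 1) (2 ^ m + mask) = x :: selB options (index + 1) (m : Int) mask := by
  unfold selB
  rw [PySem.List.pyRange_one, PySem.List.pyRange_one]
  have e1 : ((m:Int) + 1 - 0).toNat = m + 1 := by omega
  have e2 : ((m:Int) - 0).toNat = m := by omega
  rw [e1, e2, List.range_succ_eq_map, List.map_cons, List.filterMap_cons]
  simp only [zero_add, Nat.cast_zero, List.map_map]
  have hb : ((m:Int) + 1 - 1 - 0).toNat = m := by omega
  rw [hb, bit_top h0 hlt, if_pos rfl, add_zero, hx]
  dsimp only
  congr 1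
  rw [List.filterMap_map, List.filterMap_map]
  apply List.filterMap_congr
  intro k hk
  simp only [List.mem_range] at hk
  simp only [Function.comp_apply]
  have ec : ((m:Int) + 1 - 1 - (k + 1 : Nat)).toNat = m - 1 - k := by omega
  have ec2 : ((m:Int) - 1 - (k : Nat)).toNat = m - 1 - k := by omega
  rw [ec, ec2, bit_add_pow (by omega) h0]
  have ea : index + ((k + 1 : Nat) : Int) = index + 1 + (k : Nat) := by push_cast; ring
  rw [ea]

theorem selB_succ_low (options : List String) (index : Int) (m : Nat) (mask : Int)
    (h0 : 0 ≤ mask) (hlt : mask < 2 ^ m) :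
    selB options index ((m : Int) + 1) mask = selB options (index + 1) (m : Int) mask := by
  unfold selB
  rw [PySem.List.pyRange_one, PySem.List.pyRange_one]
  have e1 : ((m:Int) + 1 - 0).toNat = m + 1 := by omega
  have e2 : ((m:Int) - 0).toNat = m := by omega
  rw [e1, e2, List.range_succ_eq_map, List.map_cons, List.filterMap_cons]
  simp only [zero_add, Nat.cast_zero, List.map_map]
  have hb : ((m:Int) + 1 - 1 - 0).toNat = m := by omega
  rw [hb, bit_top_low h0 hlt]
  simp only [if_neg (by norm_num : ¬ (0:Int) = 1)]
  rw [List.filterMap_map, List.filterMap_map]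
  apply List.filterMap_congr
  intro k hk
  simp only [List.mem_range] at hk
  simp only [Function.comp_apply]
  have ec : ((m:Int) + 1 - 1 - (k + 1 : Nat)).toNat = m - 1 - k := by omega
  have ec2 : ((m:Int) - 1 - (k : Nat)).toNat = m - 1 - k := by omega
  rw [ec, ec2]
  have ea : index + ((k + 1 : Nat) : Int) = index + 1 + (k : Nat) := by push_cast; ring
  rw [ea]

theorem masksI_succ (m : Nat) :
    masksI (m + 1) = (masksI m).map (fun v => 2 ^ m + v) ++ masksI m := by
  unfold masksI
  rw [show 2 ^ (m + 1) = 2 ^ m + 2 ^ m from by ring, List.range_add, List.map_append,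
    List.map_map, List.map_map]
  congr 1
  · apply List.map_congr_left
    intro k hk
    simp only [List.mem_range] at hk
    simp only [Function.comp_apply]
    ring
  · apply List.map_congr_left
    intro k hk
    simp only [List.mem_range] at hk
    simp only [Function.comp_apply]
    push_cast
    ring

theorem gcomb_eq_ecomb (options : List String) (m : Nat) (cur : List String) (index : Int)
    (hlo : -(options.length : Int) ≤ index) (hm : index + m = (options.length : Int)) :
    gcomb options index m cur = ecomb options m cur index := by
  induction m generalizing cur index with
  | zero =>
    unfold gcomb masksI ecomb
    simp only [pow_zero, List.range_one, List.map_cons, List.map_nil, List.flatMap_cons,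
      List.flatMap_nil, List.append_nil]
    rw [show ((0:Nat):Int) = 0 from rfl, selB_zero]
    simp
  | succ m ih =>
    have hx : ∃ x, PySem.List.pyGet? options index = some x := by
      rw [← Option.ne_none_iff_exists', Ne, PySem.List.pyGet?_eq_none_iff]
      simp [PySem.Raise.InRange]; omega
    obtain ⟨x, hx⟩ := hx
    unfold gcomb
    rw [masksI_succ, List.flatMap_append, List.flatMap_map]
    have hhigh : ∀ mask ∈ masksI m,
        (fun mask =>
          let combo := cur ++ selB options index ((m + 1 : Nat) : Int) mask
          if 1 < combo.length then [PySem.Str.join "," combo] else []) ((2:Int) ^ m + mask)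
        = (fun mask =>
          let combo := (cur ++ [x]) ++ selB options (index + 1) (m : Int) mask
          if 1 < combo.length then [PySem.Str.join "," combo] else []) mask := by
      intro mask hmem
      obtain ⟨h0, hlt⟩ := mem_masksI hmem
      simp only
      rw [show ((m + 1 : Nat) : Int) = (m : Int) + 1 from by push_cast; ring,
        selB_succ_high options x index m mask hx h0 hlt]
      simp [List.append_assoc]
    have hlow : ∀ mask ∈ masksI m,
        (fun mask =>
          let combo := cur ++ selB options index ((m + 1 : Nat) : Int) mask
          if 1 < combo.length then [PySem.Str.join "," combo] else []) mask
        = (fun mask =>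
          let combo := cur ++ selB options (index + 1) (m : Int) mask
          if 1 < combo.length then [PySem.Str.join "," combo] else []) mask := by
      intro mask hmem
      obtain ⟨h0, hlt⟩ := mem_masksI hmem
      simp only
      rw [show ((m + 1 : Nat) : Int) = (m : Int) + 1 from by push_cast; ring,
        selB_succ_low options index m mask h0 hlt]
    rw [List.flatMap_congr hhigh, List.flatMap_congr hlow]
    show gcomb options (index + 1) m (cur ++ [x]) ++ gcomb options (index + 1) m cur = _
    rw [ih _ _ (by omega) (by push_cast at hm ⊢; omega),
      ih _ _ (by omega) (by push_cast at hm ⊢; omega)]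
    conv_rhs => rw [ecomb]
    rw [hx]
    rfl

-- ===== VERDICT (by name: the statement is the Claim_ definition above) =====
theorem generate_combinations_spec : Claim_equal_generate_combinations := by
  intro options cur index _ hpre
  obtain ⟨hlo, hhi⟩ := hpre
  have hm : index + (((options.length : Int) - index).toNat : Int) = (options.length : Int) := by
    omega
  unfold Spec_generate_combinations generate_combinations
  rw [genA_eq_ecomb options _ cur index hlo hm,
    alt_eq_gcomb options cur index (((options.length : Int) - index).toNat) (by omega),
    gcomb_eq_ecomb options _ cur index hlo hm]
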